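-- pv_equiv track=rewrite | github.com/hejh-ic-designer/RESIDSE | utils.py | generate_tile_sequence
-- ===== SOURCE A (Python) =====
-- def generate_tile_sequence(out_len: int, stride: list, power: int) -> list:
--     sequence = [out_len]
--     reverse_and_pop = stride[::-1][:-1]
--     square = [i**power for i in reverse_and_pop]
--     for ratio in square:
--         next_item = sequence[-1] * ratio
--         sequence.append(next_item)
--     return sequence[::-1]
-- ===== SOURCE B (Python) =====
-- def _suffix_prod(stride, i, power):
--     p = 1
--     for s in stride[i + 1:]:
--         p *= s ** power
--     return p
--
--
-- def generate_tile_sequence(out_len: int, stride: list, power: int) -> list: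
--     if not stride:
--         return [out_len]
--     return [out_len * _suffix_prod(stride, i, power) for i in range(len(stride))]
-- ===== Notes on version B (the rewrite author's own statement) =====
-- stated objective: alternative
-- what changed: Each output element is computed independently as a suffix product over stride[i+1:], replacing A's reverse-drop-cumulate-reverse single pass with per-index scans.
-- outside the precondition, e.g. on generate_tile_sequence(2, [3, 4], -1): A returns [0.5, 2], B returns [0.5, 2]
import Mathlib
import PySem

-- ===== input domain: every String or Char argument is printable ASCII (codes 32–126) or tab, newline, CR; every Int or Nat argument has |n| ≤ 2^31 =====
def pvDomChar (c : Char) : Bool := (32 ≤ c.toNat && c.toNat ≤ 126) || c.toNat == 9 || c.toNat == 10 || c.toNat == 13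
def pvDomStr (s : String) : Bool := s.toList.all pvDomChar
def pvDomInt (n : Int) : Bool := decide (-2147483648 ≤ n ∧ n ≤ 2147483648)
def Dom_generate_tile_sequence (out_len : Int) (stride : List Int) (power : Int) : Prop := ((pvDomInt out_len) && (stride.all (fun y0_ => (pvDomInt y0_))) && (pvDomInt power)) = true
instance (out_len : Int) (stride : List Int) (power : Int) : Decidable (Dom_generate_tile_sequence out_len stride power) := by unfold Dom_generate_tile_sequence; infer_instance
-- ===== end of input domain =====

-- B computes each element independently as a suffix product over stride[i+1:] instead of
-- A's reverse-drop-cumulate-reverse pass (objective: alternative decomposition, not faster).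

-- ===== PORT A =====
def generate_tile_sequence (out_len : Int) (stride : List Int) (power : Int) : List Int :=
  let sequence := [out_len]
  -- stride[::-1] is List.reverse (PySem.List.slice?_none_none_neg_one); [:-1] is slice none (-1)
  let reverse_and_pop := PySem.List.slice stride.reverse none (some (-1))
  -- i ** power : exact for 0 ≤ power (Pre_); sequence[-1] : the list is always nonempty here
  let square := reverse_and_pop.map (fun i => i ^ power.toNat)
  let sequence := square.foldl (fun seq ratio => seq ++ [PySem.List.pyGetD seq (-1) 0 * ratio]) sequence
  sequence.reverse

-- ===== PORT B =====
-- s ** power : exact for 0 ≤ power (Pre_); stride[i+1:] is slice (i+1) none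
def suffix_prod (stride : List Int) (i : Int) (power : Int) : Int :=
  (PySem.List.slice stride (some (i + 1)) none).foldl (fun p s => p * s ^ power.toNat) 1

def generate_tile_sequence_alt (out_len : Int) (stride : List Int) (power : Int) : List Int :=
  if stride = [] then [out_len]
  else (PySem.List.pyRange 0 stride.length 1).map (fun i => out_len * suffix_prod stride i power)

-- ===== PRECONDITION & SPEC =====
-- Pre_ excludes a negative power with at least two strides: there Python's ** yields floats
-- (or raises ZeroDivisionError on a zero stride), so A's return is not a list of ints.
def Pre_generate_tile_sequence (out_len : Int) (stride : List Int) (power : Int) : Prop :=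
  0 ≤ power ∨ stride.length ≤ 1
instance (out_len : Int) (stride : List Int) (power : Int) : Decidable (Pre_generate_tile_sequence out_len stride power) := by unfold Pre_generate_tile_sequence; infer_instance

def pvWitness_generate_tile_sequence : Int × List Int × Int := (8, ([2, 2, 2], 2))

def Spec_generate_tile_sequence (out_len : Int) (stride : List Int) (power : Int) (out : List Int) : Prop := out = generate_tile_sequence_alt out_len stride power
instance (out_len : Int) (stride : List Int) (power : Int) (out : List Int) : Decidable (Spec_generate_tile_sequence out_len stride power out) := by unfold Spec_generate_tile_sequence; infer_instance

-- ===== CLAIM (what is proved, stated in full; the proofs are below) =====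
def Claim_equal_generate_tile_sequence : Prop := ∀ (out_len : Int) (stride : List Int) (power : Int), Dom_generate_tile_sequence out_len stride power → Pre_generate_tile_sequence out_len stride power → Spec_generate_tile_sequence out_len stride power (generate_tile_sequence out_len stride power)

-- ===== LEMMAS AND PROOFS =====

-- A's loop body, run from any nonempty accumulator, is scanl of multiplication.
theorem pv_foldl_concat_last (l : List Int) : ∀ (pre : List Int) (a : Int),
    l.foldl (fun seq r => seq ++ [PySem.List.pyGetD seq (-1) 0 * r]) (pre ++ [a])
      = pre ++ List.scanl (· * ·) a l := by
  induction l with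
  | nil => intro pre a; simp [List.scanl]
  | cons r l ih =>
    intro pre a
    simp only [List.foldl_cons, PySem.List.pyGetD_neg_one_append_singleton, List.scanl]
    have := ih (pre ++ [a]) (a * r)
    simpa using this

theorem pv_foldl_mul_append (l : List Int) (x : Int) (e : Nat) :
    (l ++ [x]).foldl (fun p s => p * s ^ e) 1
      = (l.foldl (fun p s => p * s ^ e) 1) * x ^ e := by
  simp

-- the reversed cumulative scan equals the list of suffix products
theorem pv_scanl_rev_eq_suffix (t : List Int) : ∀ (a : Int) (e : Nat),
    (List.scanl (· * ·) a ((t.reverse).map (fun i => i ^ e))).reverse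
      = (List.range (t.length + 1)).map
          (fun i => a * (t.drop i).foldl (fun p s => p * s ^ e) 1) := by
  induction t using List.reverseRecOn with
  | nil => intro a e; simp [List.scanl]
  | append_singleton t x ih =>
    intro a e
    simp only [List.reverse_append, List.reverse_singleton, List.singleton_append, List.map_cons]
    rw [List.scanl_cons, List.reverse_cons, ih (a * x ^ e) e]
    conv_rhs => rw [show (t ++ [x]).length + 1 = (t.length + 1) + 1 by simp,
      List.range_succ, List.map_append]
    congr 1
    · apply List.map_congr_left
      intro i hi
      have hle : i ≤ t.length := by
        have := List.mem_range.mp hi; omega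
      rw [List.drop_append_of_le_length hle, pv_foldl_mul_append]
      ring
    · simp

theorem generate_tile_sequence_eq (out_len : Int) (stride : List Int) (power : Int) :
    generate_tile_sequence out_len stride power
      = generate_tile_sequence_alt out_len stride power := by
  cases stride with
  | nil =>
    simp [generate_tile_sequence, generate_tile_sequence_alt, PySem.List.slice_to_neg_one]
  | cons s t =>
    unfold generate_tile_sequence generate_tile_sequence_alt
    simp only [List.reverse_cons, PySem.List.slice_to_neg_one, List.dropLast_concat,
      reduceCtorEq, ite_false]
    have hfold := pv_foldl_concat_last ((t.reverse).map (fun i => i ^ power.toNat)) [] out_len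
    simp only [List.nil_append] at hfold
    rw [hfold, pv_scanl_rev_eq_suffix t out_len power.toNat]
    -- rewrite B's side: pyRange over the length, slices as drops
    rw [show ((s :: t).length : Int) = ((t.length + 1 : Nat) : Int) by simp]
    rw [PySem.List.pyRange_zero_nat]
    rw [List.map_map]
    apply List.map_congr_left
    intro i hi
    unfold suffix_prod
    have hcast : ((i : Int) + 1) = ((i + 1 : Nat) : Int) := by push_cast; ring
    rw [Function.comp_apply, hcast, PySem.List.slice_from_natCast]
    simp

-- ===== VERDICT (by name: the statement is the Claim_ definition above) =====
theorem generate_tile_sequence_spec : Claim_equal_generate_tile_sequence := by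
  intro out_len stride power _hdom _hpre
  unfold Spec_generate_tile_sequence
  exact generate_tile_sequence_eq out_len stride power
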